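-- pv_equiv track=rewrite | github.com/adendorffy/acoustic-units | calculate_distance.py | get_batch_of_paths
-- ===== SOURCE A (Python) =====
-- def pair_generator(num_paths):
--     for i in range(num_paths):
--         for j in range(i + 1, num_paths):
--             yield i, j
--
-- def get_batch_of_paths(num_paths, chunk_limit=100):
--     """Generate sequential batches of (i, j) path pairs."""
--     pairs = pair_generator(num_paths)
--     chunk = []
--
--     for idx, (i, j) in enumerate(pairs, 1):
--         chunk.append((i, j))
--
--         if idx % chunk_limit == 0:
--             yield chunk
--             chunk = []
--
--     if chunk:
--         yield chunk
-- ===== SOURCE B (Python) =====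
-- def get_batch_of_paths(num_paths, chunk_limit=100):
--     """Generate sequential batches of (i, j) path pairs.
--
--     Materializes all pairs once, then yields consecutive slices of length
--     chunk_limit, instead of streaming pairs with a running counter/modulo.
--     """
--     pairs = [(i, j) for i in range(num_paths) for j in range(i + 1, num_paths)]
--     for start in range(0, len(pairs), chunk_limit):
--         yield pairs[start:start + chunk_limit]
-- ===== Notes on version B (the rewrite author's own statement) =====
-- stated objective: idiomatic
-- what changed: B materializes the pair list once and yields consecutive slices pairs[start:start+chunk_limit] via range(0, len, chunk_limit), replacing A's streaming loop with a running counter, modulo test and trailing-chunk flush.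
-- outside the precondition, e.g. on get_batch_of_paths(1, 0): A returns [], B raises ValueError
import Mathlib
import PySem

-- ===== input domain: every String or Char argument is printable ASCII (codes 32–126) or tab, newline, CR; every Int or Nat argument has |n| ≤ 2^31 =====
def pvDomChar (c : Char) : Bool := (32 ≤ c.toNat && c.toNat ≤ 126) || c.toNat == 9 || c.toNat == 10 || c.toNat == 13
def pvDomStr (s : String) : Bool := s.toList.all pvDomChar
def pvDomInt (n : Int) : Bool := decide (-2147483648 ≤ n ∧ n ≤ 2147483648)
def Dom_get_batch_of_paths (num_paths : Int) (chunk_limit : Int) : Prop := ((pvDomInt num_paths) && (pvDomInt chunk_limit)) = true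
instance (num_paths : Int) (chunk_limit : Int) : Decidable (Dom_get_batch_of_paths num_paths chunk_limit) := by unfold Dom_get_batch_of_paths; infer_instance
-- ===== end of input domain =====

-- B replaces A's streaming counter/modulo batching by materializing the pair list once and
-- yielding consecutive slices (idiomatic; same cost). Both are generators; equivalence is about
-- the sequence of yielded chunks (no argument is mutated).


-- ===== PORT A =====
-- pair_generator: nested for-loops yielding (i, j)
def pairGeneratorA (num_paths : Int) : List (Int × Int) :=
  (PySem.List.pyRange 0 num_paths).foldl (fun acc i =>
    (PySem.List.pyRange (i + 1) num_paths).foldl (fun acc2 j => acc2 ++ [(i, j)]) acc) []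

-- the enumerate(pairs, 1) counter is carried as the third state component (idx)
def get_batch_of_paths (num_paths : Int) (chunk_limit : Int) : List (List (Int × Int)) :=
  let pairs := pairGeneratorA num_paths
  let st := pairs.foldl
    (fun (s : List (List (Int × Int)) × List (Int × Int) × Int) p =>
      let idx := s.2.2 + 1
      let chunk := s.2.1 ++ [p]
      if PySem.Int.mod idx chunk_limit == 0 then (s.1 ++ [chunk], [], idx)
      else (s.1, chunk, idx))
    ([], [], 0)
  if st.2.1 = [] then st.1 else st.1 ++ [st.2.1]

-- ===== PORT B =====
def get_batch_of_paths_alt (num_paths : Int) (chunk_limit : Int) : List (List (Int × Int)) :=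
  let pairs := (PySem.List.pyRange 0 num_paths).flatMap (fun i =>
    (PySem.List.pyRange (i + 1) num_paths).map (fun j => (i, j)))
  (PySem.List.pyRange 0 (pairs.length : Int) chunk_limit).map (fun start =>
    PySem.List.slice pairs (some start) (some (start + chunk_limit)))

-- ===== PRECONDITION & SPEC =====
-- Pre_ excludes chunk_limit ≤ 0 whenever at least one pair exists (num_paths ≥ 2), and
-- chunk_limit = 0 even when none does: at chunk_limit = 0 A raises ZeroDivisionError on the first
-- pair (and B's range(0, len, 0) raises ValueError even for an empty pair list), and for negative
-- chunk_limit A's grouping by |chunk_limit| is an accident of Python's modulo sign rule, a corner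
-- no caller of a batching helper would specify (B yields nothing there).
def Pre_get_batch_of_paths (num_paths : Int) (chunk_limit : Int) : Prop :=
  1 ≤ chunk_limit ∨ (num_paths < 2 ∧ chunk_limit < 0)
instance (num_paths : Int) (chunk_limit : Int) : Decidable (Pre_get_batch_of_paths num_paths chunk_limit) := by unfold Pre_get_batch_of_paths; infer_instance
def pvWitness_get_batch_of_paths : Int × Int := (5, 2)

def Spec_get_batch_of_paths (num_paths : Int) (chunk_limit : Int) (out : List (List (Int × Int))) : Prop := out = get_batch_of_paths_alt num_paths chunk_limit
instance (num_paths : Int) (chunk_limit : Int) (out : List (List (Int × Int))) : Decidable (Spec_get_batch_of_paths num_paths chunk_limit out) := by unfold Spec_get_batch_of_paths; infer_instance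

-- ===== CLAIM (what is proved, stated in full; the proofs are below) =====
def Claim_equal_get_batch_of_paths : Prop := ∀ (num_paths : Int) (chunk_limit : Int), Dom_get_batch_of_paths num_paths chunk_limit → Pre_get_batch_of_paths num_paths chunk_limit → Spec_get_batch_of_paths num_paths chunk_limit (get_batch_of_paths num_paths chunk_limit)

-- ===== LEMMAS AND PROOFS =====

-- Reference chunker: structural recursion carrying A's partial chunk P and counter m.
def Gref (c : Int) : List (Int × Int) → List (Int × Int) → Int → List (List (Int × Int))
  | [], P, _ => if P = [] then [] else [P]
  | p :: L, P, m =>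
      if PySem.Int.mod (m + 1) c == 0 then (P ++ [p]) :: Gref c L [] (m + 1)
      else Gref c L (P ++ [p]) (m + 1)

-- take/drop chunking in blocks of c
def chunksTD (c : Nat) (L : List (Int × Int)) : List (List (Int × Int)) :=
  if h : L = [] ∨ c = 0 then [] else L.take c :: chunksTD c (L.drop c)
termination_by L.length
decreasing_by
  simp only [not_or] at h
  have hL : L ≠ [] := h.1
  have hc : c ≠ 0 := h.2
  have : 0 < L.length := List.length_pos_of_ne_nil hL
  simp [List.length_drop]; omega

lemma foldl_eq_Gref (c : Int) :
    ∀ (L : List (Int × Int)) (done : List (List (Int × Int))) (P : List (Int × Int)) (m : Int),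
    (let st := L.foldl
        (fun (s : List (List (Int × Int)) × List (Int × Int) × Int) p =>
          let idx := s.2.2 + 1
          let chunk := s.2.1 ++ [p]
          if PySem.Int.mod idx c == 0 then (s.1 ++ [chunk], [], idx)
          else (s.1, chunk, idx))
        (done, P, m)
      if st.2.1 = [] then st.1 else st.1 ++ [st.2.1])
    = done ++ Gref c L P m := by
  intro L
  induction L with
  | nil =>
      intro done P m
      simp only [List.foldl_nil, Gref]
      by_cases h : P = [] <;> simp [h]
  | cons p L ih =>
      intro done P m
      simp only [List.foldl_cons, Gref]
      by_cases h : (PySem.Int.mod (m + 1) c == 0) = true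
      · simp only [if_pos h]
        rw [show done ++ (P ++ [p]) :: Gref c L [] (m + 1)
            = (done ++ [P ++ [p]]) ++ Gref c L [] (m + 1) by simp]
        exact ih (done ++ [P ++ [p]]) [] (m + 1)
      · simp only [if_neg h]
        exact ih done (P ++ [p]) (m + 1)

lemma emod_succ {m c : Int} (hc : 0 < c) :
    (m + 1) % c = if m % c = c - 1 then 0 else m % c + 1 := by
  have h0 : 0 ≤ m % c := Int.emod_nonneg m (by omega)
  have h1 : m % c < c := Int.emod_lt_of_pos m hc
  have key : (m + 1) % c = (m % c + 1) % c := by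
    conv_lhs => rw [← Int.emod_add_mul_ediv m c]
    rw [show m % c + c * (m / c) + 1 = m % c + 1 + c * (m / c) by ring]
    rw [Int.add_mul_emod_self_left]
  rw [key]
  by_cases h : m % c = c - 1
  · rw [if_pos h, h, show c - 1 + 1 = c by ring, Int.emod_self]
  · rw [if_neg h]
    exact Int.emod_eq_of_lt (by omega) (by omega)

lemma Gref_fill (c : Int) (hc : 1 ≤ c) :
    ∀ (t : Nat) (L P : List (Int × Int)) (m : Int), 0 ≤ m → 1 ≤ t → (t : Int) ≤ c →
    PySem.Int.mod m c = c - t →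
    Gref c L P m =
      if L.length < t then (if P ++ L = [] then [] else [P ++ L])
      else (P ++ L.take t) :: Gref c (L.drop t) [] (m + t) := by
  intro t
  induction t with
  | zero => omega
  | succ t ih =>
      intro L P m hm ht htc hr
      have hcpos : (0:Int) < c := by omega
      rw [PySem.Int.mod_eq_emod_of_pos hcpos] at hr
      push_cast at hr htc
      match L with
      | [] =>
          simp only [Gref, List.length_nil, List.append_nil]
          rw [if_pos (Nat.succ_pos t)]
      | p :: L =>
          rcases Nat.eq_zero_or_pos t with h1 | h1
          · -- this element completes the chunk
            subst h1
            have hz : (PySem.Int.mod (m + 1) c == 0) = true := by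
              rw [PySem.Int.mod_eq_emod_of_pos hcpos, emod_succ hcpos,
                if_pos (show m % c = c - 1 by omega)]
              rfl
            have houter : ¬ (p :: L).length < 0 + 1 := by simp
            simp only [Gref, hz, if_true]
            rw [if_neg houter]
            push_cast
            simp
          · -- no emit yet
            have hne : ¬ ((PySem.Int.mod (m + 1) c == 0) = true) := by
              rw [PySem.Int.mod_eq_emod_of_pos hcpos, emod_succ hcpos,
                if_neg (show ¬ m % c = c - 1 by omega)]
              simp only [beq_iff_eq]
              omega
            have hr' : PySem.Int.mod (m + 1) c = c - (t : Int) := by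
              rw [PySem.Int.mod_eq_emod_of_pos hcpos, emod_succ hcpos,
                if_neg (show ¬ m % c = c - 1 by omega)]
              omega
            simp only [Gref, if_neg hne]
            rw [ih L (P ++ [p]) (m + 1) (by omega) h1 (by omega) hr']
            by_cases hl : L.length < t
            · have houter : (p :: L).length < t + 1 := by
                simp only [List.length_cons]; omega
              rw [if_pos hl, if_pos houter,
                if_neg (show ¬ P ++ [p] ++ L = [] by simp),
                if_neg (show ¬ P ++ p :: L = [] by simp)]
              simp
            · have houter : ¬ (p :: L).length < t + 1 := by
                simp only [List.length_cons]; omega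
              rw [if_neg hl, if_neg houter]
              push_cast
              rw [show m + ((t : Int) + 1) = m + 1 + (t : Int) by ring]
              simp [List.take_succ_cons, List.drop_succ_cons]

lemma Gref_eq_chunksTD (c : Int) (hc : 1 ≤ c) (L : List (Int × Int)) (m : Int)
    (hm : 0 ≤ m) (hr : PySem.Int.mod m c = 0) :
    Gref c L [] m = chunksTD c.toNat L := by
  match L with
  | [] => simp [Gref, chunksTD]
  | p :: L' =>
      rw [Gref_fill c hc c.toNat (p :: L') [] m hm (by omega) (by omega)
        (by rw [hr]; omega)]
      rw [chunksTD, dif_neg (by simp; omega)]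
      by_cases hl : (p :: L').length < c.toNat
      · rw [if_pos hl]
        rw [List.take_of_length_le (by omega), List.drop_of_length_le (by omega)]
        rw [chunksTD]
        simp
      · rw [if_neg hl]
        simp only [List.nil_append]
        congr 1
        rw [show m + (c.toNat : Int) = m + c by omega]
        rw [Gref_eq_chunksTD c hc ((p :: L').drop c.toNat) (m + c) (by omega)
          (by rw [PySem.Int.mod_eq_emod_of_pos (by omega : (0:Int) < c), Int.add_emod_right]
              rw [PySem.Int.mod_eq_emod_of_pos (by omega : (0:Int) < c)] at hr
              exact hr)]
termination_by L.length
decreasing_by simp [List.length_drop]; omega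

-- general-step range cons/shift facts needed for B
lemma pyRange_pos_cons {a b c : Int} (hc : 0 < c) (hab : a < b) :
    PySem.List.pyRange a b c = a :: PySem.List.pyRange (a + c) b c := by
  rw [PySem.List.pyRange_of_pos _ _ hc, PySem.List.pyRange_of_pos _ _ hc]
  rw [if_pos hab]
  by_cases h2 : a + c < b
  · rw [if_pos h2]
    have h3 : (b - a + c - 1) / c = (b - (a + c) + c - 1) / c + 1 := by
      rw [show b - a + c - 1 = (b - (a + c) + c - 1) + 1 * c by ring,
        Int.add_mul_ediv_right _ _ (by omega)]
    have h4 : 0 ≤ (b - (a + c) + c - 1) / c := Int.ediv_nonneg (by omega) (by omega)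
    rw [show ((b - a + c - 1) / c).toNat = ((b - (a + c) + c - 1) / c).toNat + 1 by omega]
    rw [List.range_succ_eq_map]
    simp only [List.map_cons, List.map_map]
    congr 1
    · simp
    · apply List.map_congr_left
      intro k _
      simp only [Function.comp_apply]
      push_cast
      ring
  · rw [if_neg h2]
    have h3 : (b - a + c - 1) / c = 1 := by
      rw [← PySem.Int.floordiv_eq_ediv_of_pos hc, PySem.Int.floordiv_eq_iff_of_pos hc]
      refine ⟨by linarith, by linarith⟩
    rw [h3]
    simp

lemma pyRange_pos_nil {a b c : Int} (hc : 0 < c) (hab : b ≤ a) :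
    PySem.List.pyRange a b c = [] := by
  rw [PySem.List.pyRange_of_pos _ _ hc, if_neg (by omega)]
  simp

lemma alt_chunks_eq_chunksTD (c : Int) (hc : 1 ≤ c) (L : List (Int × Int)) :
    (PySem.List.pyRange 0 (L.length : Int) c).map (fun start =>
      PySem.List.slice L (some start) (some (start + c))) = chunksTD c.toNat L := by
  match L with
  | [] => rw [pyRange_pos_nil (by omega) (by simp), chunksTD]; simp
  | p :: L' =>
      have hlen : 0 < (p :: L').length := by simp
      rw [pyRange_pos_cons (by omega) (by exact_mod_cast hlen)]
      rw [chunksTD, dif_neg (by simp; omega)]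
      simp only [List.map_cons, zero_add]
      congr 1
      · rw [PySem.List.slice_toNat (p :: L') (by omega) (by omega)]
        simp
      · rw [← alt_chunks_eq_chunksTD c hc ((p :: L').drop c.toNat)]
        by_cases hbig : c < ((p :: L').length : Int)
        · have hlen' : (((p :: L').drop c.toNat).length : Int) = (p :: L').length - c := by
            simp only [List.length_drop]
            omega
          rw [hlen']
          have hshift : PySem.List.pyRange c ((p :: L').length : Int) c =
              (PySem.List.pyRange 0 (((p :: L').length : Int) - c) c).map (· + c) := by
            rw [PySem.List.pyRange_of_pos _ _ (show (0:Int) < c by omega),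
                PySem.List.pyRange_of_pos _ _ (show (0:Int) < c by omega)]
            rw [if_pos (by omega), if_pos (by omega)]
            rw [show ((p :: L').length : Int) - c - 0 + c - 1
                = ((p :: L').length : Int) - c + c - 1 by ring]
            simp only [List.map_map]
            apply List.map_congr_left
            intro k _
            simp only [Function.comp_apply]
            ring
          rw [hshift, List.map_map]
          apply List.map_congr_left
          intro s hs
          have hs' := (PySem.List.mem_pyRange_iff_of_pos
            (show (0:Int) < c by omega) s).1 hs
          simp only [Function.comp_apply]
          rw [PySem.List.slice_toNat (p :: L') (by omega) (by omega),
              PySem.List.slice_toNat ((p :: L').drop c.toNat) (by omega) (by omega)]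
          rw [List.drop_drop]
          congr 1
          · omega
          · congr 1
            omega
        · have h1 : PySem.List.pyRange c ((p :: L').length : Int) c = [] :=
            pyRange_pos_nil (by omega) (by omega)
          have h2 : ((((p :: L').drop c.toNat).length : Int)) ≤ 0 := by
            simp only [List.length_drop]
            omega
          rw [h1, pyRange_pos_nil (by omega) (by omega)]
          simp
termination_by L.length
decreasing_by simp [List.length_drop]; omega

lemma pyRange_zero_zero (c : Int) : PySem.List.pyRange 0 0 c = [] := by
  unfold PySem.List.pyRange
  split_ifs <;> simp_all <;> omega

lemma pairGeneratorA_nil {n : Int} (hn : n < 2) : pairGeneratorA n = [] := by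
  unfold pairGeneratorA
  rcases (by omega : n ≤ 0 ∨ 0 < n) with h | h
  · rw [PySem.List.pyRange_one_eq_nil (by omega)]
    rfl
  · have h1 : n = 1 := by omega
    subst h1
    rw [PySem.List.pyRange_one_cons (by omega), PySem.List.pyRange_one_eq_nil (by omega)]
    simp only [List.foldl_cons, List.foldl_nil]
    rw [PySem.List.pyRange_one_eq_nil (by omega)]
    rfl

lemma pairsA_eq_pairsB (num_paths : Int) :
    pairGeneratorA num_paths =
      (PySem.List.pyRange 0 num_paths).flatMap (fun i =>
        (PySem.List.pyRange (i + 1) num_paths).map (fun j => (i, j))) := by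
  unfold pairGeneratorA
  rw [show (fun (acc : List (Int × Int)) (i : Int) =>
        (PySem.List.pyRange (i + 1) num_paths).foldl (fun acc2 j => acc2 ++ [(i, j)]) acc)
      = fun acc i => acc ++ (PySem.List.pyRange (i + 1) num_paths).map (fun j => (i, j)) from by
    funext acc i
    exact PySem.List.foldl_append_singleton_eq_map _ _ _]
  rw [PySem.List.foldl_append_eq_flatMap]
  simp

-- ===== VERDICT (by name: the statement is the Claim_ definition above) =====
theorem get_batch_of_paths_spec : Claim_equal_get_batch_of_paths := by
  intro num_paths chunk_limit _ hpre
  unfold Spec_get_batch_of_paths get_batch_of_paths get_batch_of_paths_alt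
  rw [pairsA_eq_pairsB]
  set L := (PySem.List.pyRange 0 num_paths).flatMap (fun i =>
    (PySem.List.pyRange (i + 1) num_paths).map (fun j => (i, j))) with hLdef
  rcases hpre with hc | ⟨hn, _⟩
  case inr =>
    -- no pairs at all: both sides are []
    have hLnil : L = [] := by rw [hLdef, ← pairsA_eq_pairsB]; exact pairGeneratorA_nil hn
    rw [hLnil]
    simp only [List.foldl_nil, List.length_nil, Int.natCast_zero]
    rw [pyRange_zero_zero]
    simp
  rw [alt_chunks_eq_chunksTD chunk_limit hc L]
  rw [foldl_eq_Gref chunk_limit L [] [] 0]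
  rw [Gref_eq_chunksTD chunk_limit hc L 0 le_rfl
    (by rw [PySem.Int.mod_eq_emod_of_pos (by omega)]; simp)]
  simp
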